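-- pv_equiv track=rewrite | github.com/stef41/sentience2vec | scripts/merge_all_effects.py | get_drug_class
-- ===== SOURCE A (Python) =====
-- CATEGORY_MAP = {
--     'psychedelic': 'psychedelic',
--     'dissociative': 'dissociative',
--     'stimulant': 'stimulant',
--     'depressant': 'depressant',
--     'opioid': 'opioid',
--     'empathogen': 'empathogen',
--     'entactogen': 'empathogen',
--     'benzodiazepine': 'depressant',
--     'barbiturate': 'depressant',
--     'deliriant': 'deliriant',
--     'nootropic': 'nootropic',
--     'cannabinoid': 'cannabinoid',
-- }
--
-- def get_drug_class(entry):
--     categories = entry.get('categories', [])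
--     priority = ['psychedelic', 'dissociative', 'empathogen', 'stimulant',
--                 'opioid', 'depressant', 'deliriant', 'nootropic', 'cannabinoid']
--     for p in priority:
--         if p in categories:
--             return CATEGORY_MAP.get(p, p)
--     for cat in categories:
--         if cat in CATEGORY_MAP:
--             return CATEGORY_MAP[cat]
--     return 'other'
-- ===== SOURCE B (Python) =====
-- CATEGORY_MAP = {
--     'psychedelic': 'psychedelic',
--     'dissociative': 'dissociative',
--     'stimulant': 'stimulant',
--     'depressant': 'depressant',
--     'opioid': 'opioid',
--     'empathogen': 'empathogen',
--     'entactogen': 'empathogen',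
--     'benzodiazepine': 'depressant',
--     'barbiturate': 'depressant',
--     'deliriant': 'deliriant',
--     'nootropic': 'nootropic',
--     'cannabinoid': 'cannabinoid',
-- }
--
-- _PRIORITY = ['psychedelic', 'dissociative', 'empathogen', 'stimulant',
--              'opioid', 'depressant', 'deliriant', 'nootropic', 'cannabinoid']
-- _RANK = {p: i for i, p in enumerate(_PRIORITY)}
--
--
-- def get_drug_class(entry):
--     best = None      # (rank, class) with the smallest rank seen so far
--     fallback = None  # class of the first category that is a CATEGORY_MAP key
--     for cat in entry.get('categories', []):
--         r = _RANK.get(cat)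
--         if r is not None and (best is None or r < best[0]):
--             best = (r, CATEGORY_MAP.get(cat, cat))
--         if fallback is None and cat in CATEGORY_MAP:
--             fallback = CATEGORY_MAP[cat]
--     if best is not None:
--         return best[1]
--     return fallback if fallback is not None else 'other'
-- ===== Notes on version B (the rewrite author's own statement) =====
-- stated objective: alternative
-- what changed: Replaces A's two ordered scans (a pass over the 9-name priority list testing membership in categories, then a pass over categories) by a single pass over categories that keeps a minimum-rank best match via a precomputed name-to-rank table plus a first-hit fallback.
import Mathlib
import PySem

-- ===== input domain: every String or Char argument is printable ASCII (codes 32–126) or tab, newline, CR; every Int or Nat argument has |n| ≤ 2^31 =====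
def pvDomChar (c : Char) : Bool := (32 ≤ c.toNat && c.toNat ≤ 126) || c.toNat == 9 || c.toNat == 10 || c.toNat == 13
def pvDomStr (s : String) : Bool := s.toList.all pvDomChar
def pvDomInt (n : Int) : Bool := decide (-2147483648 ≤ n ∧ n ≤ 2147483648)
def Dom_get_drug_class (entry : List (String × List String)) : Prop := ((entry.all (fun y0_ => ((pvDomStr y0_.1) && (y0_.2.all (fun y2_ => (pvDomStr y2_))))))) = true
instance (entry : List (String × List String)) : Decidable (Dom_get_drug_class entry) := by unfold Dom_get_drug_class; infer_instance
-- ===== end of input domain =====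

-- B replaces A's two ordered scans (priority list then categories) by one pass over the
-- categories keeping a minimum-rank match via a precomputed rank table, plus a first-hit fallback.

-- ===== PORT A =====
def pvCatMap : PySem.Dict String String := PySem.Dict.mk
  [("psychedelic", "psychedelic"), ("dissociative", "dissociative"), ("stimulant", "stimulant"),
   ("depressant", "depressant"), ("opioid", "opioid"), ("empathogen", "empathogen"),
   ("entactogen", "empathogen"), ("benzodiazepine", "depressant"), ("barbiturate", "depressant"),
   ("deliriant", "deliriant"), ("nootropic", "nootropic"), ("cannabinoid", "cannabinoid")]

def pvPriority : List String :=
  ["psychedelic", "dissociative", "empathogen", "stimulant",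
   "opioid", "depressant", "deliriant", "nootropic", "cannabinoid"]

-- `for p in priority: if p in categories: return CATEGORY_MAP.get(p, p)`
def pvLoopP : List String → List String → Option String
  | [], _ => none
  | p :: ps, cats => if cats.contains p then some (pvCatMap.getD p p) else pvLoopP ps cats

-- `for cat in categories: if cat in CATEGORY_MAP: return CATEGORY_MAP[cat]`
def pvLoopC : List String → Option String
  | [] => none
  | c :: cs =>
    match pvCatMap.get? c with
    | some v => some v
    | none => pvLoopC cs

def get_drug_class (entry : List (String × List String)) : String :=
  let categories := (PySem.Dict.mk entry).getD "categories" []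
  match pvLoopP pvPriority categories with
  | some v => v
  | none =>
    match pvLoopC categories with
    | some v => v
    | none => "other"

-- ===== PORT B =====
-- _RANK = {p: i for i, p in enumerate(_PRIORITY)}
def pvRank : PySem.Dict String Int :=
  (PySem.List.enumerate pvPriority).foldl (fun d ip => d.insert ip.2 ip.1) PySem.Dict.empty

-- one iteration of B's single loop over the categories: state = (best, fallback)
def pvStep (st : Option (Int × String) × Option String) (cat : String) :
    Option (Int × String) × Option String :=
  let best :=
    match pvRank.get? cat with
    | some r =>
      match st.1 with
      | none => some (r, pvCatMap.getD cat cat)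
      | some (br, bv) => if r < br then some (r, pvCatMap.getD cat cat) else some (br, bv)
    | none => st.1
  let fb :=
    match st.2 with
    | some v => some v
    | none => pvCatMap.get? cat
  (best, fb)

def get_drug_class_alt (entry : List (String × List String)) : String :=
  let categories := (PySem.Dict.mk entry).getD "categories" []
  let res := categories.foldl pvStep (none, none)
  match res.1 with
  | some bv => bv.2
  | none =>
    match res.2 with
    | some v => v
    | none => "other"

-- ===== PRECONDITION & SPEC =====
def Spec_get_drug_class (entry : List (String × List String)) (out : String) : Prop := out = get_drug_class_alt entry
instance (entry : List (String × List String)) (out : String) : Decidable (Spec_get_drug_class entry out) := by unfold Spec_get_drug_class; infer_instance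

-- ===== CLAIM (what is proved, stated in full; the proofs are below) =====
def Claim_equal_get_drug_class : Prop := ∀ (entry : List (String × List String)), Dom_get_drug_class entry → Spec_get_drug_class entry (get_drug_class entry)

-- ===== LEMMAS AND PROOFS =====

-- merge of two "best (rank, class)" candidates: smaller rank wins, ties keep the first
def pvMrg : Option (Int × String) → Option (Int × String) → Option (Int × String)
  | b, none => b
  | none, m => m
  | some (r, v), some (r', v') => if r' < r then some (r', v') else some (r, v)

-- the candidate a single category contributes
def pvCand (c : String) : Option (Int × String) :=
  (pvRank.get? c).map (fun r => (r, pvCatMap.getD c c))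

-- the minimum-rank candidate of a category list (first occurrence wins ties)
def pvMinOf : List String → Option (Int × String)
  | [] => none
  | c :: cs => pvMrg (pvCand c) (pvMinOf cs)

-- A's priority loop annotated with ranks
def pvLoopR : List (Int × String) → List String → Option (Int × String)
  | [], _ => none
  | (i, p) :: ps, cats =>
    if cats.contains p then some (i, pvCatMap.getD p p) else pvLoopR ps cats

theorem pvMrg_none_left (m : Option (Int × String)) : pvMrg none m = m := by
  cases m <;> rfl

theorem pvStep_best (b : Option (Int × String)) (f : Option String) (c : String) :
    (pvStep (b, f) c).1 = pvMrg b (pvCand c) := by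
  cases hr : pvRank.get? c <;> cases b <;>
    simp [pvStep, pvCand, pvMrg, hr]

theorem pvMrg_assoc (b x m : Option (Int × String)) :
    pvMrg (pvMrg b x) m = pvMrg b (pvMrg x m) := by
  rcases b with _ | ⟨r1, v1⟩ <;> rcases x with _ | ⟨r2, v2⟩ <;> rcases m with _ | ⟨r3, v3⟩ <;>
    simp only [pvMrg] <;>
    repeat first
      | rfl
      | (exfalso; omega)
      | (split_ifs <;> try simp only [pvMrg])


theorem pvFold_decomp (cats : List String) (b : Option (Int × String)) (f : Option String) :
    cats.foldl pvStep (b, f) =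
      (pvMrg b (pvMinOf cats),
       match f with | some v => some v | none => pvLoopC cats) := by
  induction cats generalizing b f with
  | nil => cases f <;> simp [pvMinOf, pvMrg, pvLoopC]
  | cons c cs ih =>
    have hst : pvStep (b, f) c =
        (pvMrg b (pvCand c),
         match f with | some v => some v | none => pvCatMap.get? c) := by
      have h1 := pvStep_best b f c
      cases f <;> exact Prod.ext h1 rfl
    rw [List.foldl_cons, hst, ih]
    refine Prod.ext ?_ ?_
    · show pvMrg (pvMrg b (pvCand c)) (pvMinOf cs) = pvMrg b (pvMinOf (c :: cs))
      rw [pvMinOf, pvMrg_assoc]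
    · cases f with
      | some v => rfl
      | none =>
        show (match pvCatMap.get? c with | some v => some v | none => pvLoopC cs)
              = pvLoopC (c :: cs)
        rfl

-- B's rank table as a literal association list (9 distinct keys, ranks 0..8)
theorem pvRank_eq :
    pvRank = PySem.Dict.mk ((PySem.List.enumerate pvPriority).map (fun ip => (ip.2, ip.1))) := by
  rfl

-- A's ranked priority loop restricted to the single category c
def pvCandIn (ps : List (Int × String)) (c : String) : Option (Int × String) :=
  (ps.find? (fun ip => ip.2 == c)).map (fun ip => (ip.1, pvCatMap.getD c c))

theorem pvGetq (L : List (Int × String)) (c : String) :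
    (PySem.Dict.mk (L.map (fun ip => (ip.2, ip.1)))).get? c
      = (L.find? (fun ip => ip.2 == c)).map Prod.fst := by
  induction L with
  | nil => rfl
  | cons ip L ih =>
    rw [List.map_cons, PySem.Dict.get?_mk_cons]
    by_cases hpc : (ip.2 == c) = true
    · rw [if_pos hpc, List.find?_cons_of_pos (p := fun ip : Int × String => ip.2 == c) hpc]; rfl
    · rw [if_neg hpc, List.find?_cons_of_neg (p := fun ip : Int × String => ip.2 == c) hpc, ih]

theorem pvCand_eq_candIn (c : String) :
    pvCand c = pvCandIn (PySem.List.enumerate pvPriority) c := by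
  rw [pvCand, pvRank_eq, pvGetq, pvCandIn]
  cases (PySem.List.enumerate pvPriority).find? (fun ip => ip.2 == c) <;> rfl

theorem pvLoopR_mem (ps : List (Int × String)) (cats : List String) (r : Int) (v : String)
    (h : pvLoopR ps cats = some (r, v)) : r ∈ ps.map Prod.fst := by
  induction ps with
  | nil => simp [pvLoopR] at h
  | cons ip ps ih =>
    obtain ⟨i, p⟩ := ip
    rw [pvLoopR] at h
    by_cases hc : cats.contains p = true
    · rw [if_pos hc] at h
      simp only [Option.some.injEq, Prod.mk.injEq] at h
      simp [← h.1]
    · rw [if_neg hc] at h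
      simp [ih h]

theorem pvCandIn_mem (ps : List (Int × String)) (c : String) (r : Int) (v : String)
    (h : pvCandIn ps c = some (r, v)) : r ∈ ps.map Prod.fst := by
  induction ps with
  | nil => simp [pvCandIn] at h
  | cons ip ps ih =>
    rw [pvCandIn] at h
    by_cases hpc : (ip.2 == c) = true
    · rw [List.find?_cons_of_pos (p := fun ip : Int × String => ip.2 == c) hpc] at h
      simp only [Option.map_some, Option.some.injEq, Prod.mk.injEq] at h
      simp [← h.1]
    · rw [List.find?_cons_of_neg (p := fun ip : Int × String => ip.2 == c) hpc] at h
      simp [ih h]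

-- the crux: over a rank-sorted priority list, prepending one category to the scanned
-- list updates A's first-match result exactly as pvMrg merges in that category's candidate
theorem pvG (ps : List (Int × String)) (hps : (ps.map Prod.fst).Pairwise (· < ·))
    (c : String) (cs : List String) :
    pvMrg (pvCandIn ps c) (pvLoopR ps cs) = pvLoopR ps (c :: cs) := by
  induction ps with
  | nil => rfl
  | cons ip ps ih =>
    obtain ⟨i, p⟩ := ip
    rw [List.map_cons, List.pairwise_cons] at hps
    obtain ⟨hlt, hpair⟩ := hps
    have ih' := ih hpair
    by_cases hpc : (p == c) = true
    · have hp : p = c := by simpa using hpc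
      subst hp
      have h1 : pvCandIn ((i, p) :: ps) p = some (i, pvCatMap.getD p p) := by
        rw [pvCandIn, List.find?_cons_of_pos (by simp)]; rfl
      have h2 : (p :: cs).contains p = true := by simp
      rw [show pvLoopR ((i, p) :: ps) (p :: cs)
            = if (p :: cs).contains p then some (i, pvCatMap.getD p p) else pvLoopR ps (p :: cs)
          from rfl, if_pos h2, h1]
      rw [show pvLoopR ((i, p) :: ps) cs
            = if cs.contains p then some (i, pvCatMap.getD p p) else pvLoopR ps cs from rfl]
      by_cases hcc : cs.contains p = true
      · rw [if_pos hcc]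
        simp only [pvMrg]
        rw [if_neg (lt_irrefl i)]
      · rw [if_neg hcc]
        cases hres : pvLoopR ps cs with
        | none => rfl
        | some rv =>
          obtain ⟨r, v⟩ := rv
          have hir : i < r := hlt r (pvLoopR_mem ps cs r v hres)
          simp only [pvMrg]
          rw [if_neg (by omega)]
    · have hpc' : ¬ p = c := by simpa using hpc
      have hcd : (c :: cs).contains p = cs.contains p := by
        simp [hpc']
      have hcand : pvCandIn ((i, p) :: ps) c = pvCandIn ps c := by
        rw [pvCandIn, List.find?_cons_of_neg (by simpa using hpc')]; rfl
      rw [show pvLoopR ((i, p) :: ps) (c :: cs)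
            = if (c :: cs).contains p then some (i, pvCatMap.getD p p) else pvLoopR ps (c :: cs)
          from rfl, hcd, hcand]
      rw [show pvLoopR ((i, p) :: ps) cs
            = if cs.contains p then some (i, pvCatMap.getD p p) else pvLoopR ps cs from rfl]
      by_cases hcp : cs.contains p = true
      · rw [if_pos hcp, if_pos hcp]
        cases hcnd : pvCandIn ps c with
        | none => exact pvMrg_none_left _
        | some rv =>
          obtain ⟨r, v⟩ := rv
          have hir : i < r := hlt r (pvCandIn_mem ps c r v hcnd)
          simp only [pvMrg]
          rw [if_pos hir]
      · rw [if_neg hcp, if_neg hcp]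
        exact ih'

theorem pvCrux (c : String) (cs : List String) :
    pvMrg (pvCand c) (pvLoopR (PySem.List.enumerate pvPriority) cs)
      = pvLoopR (PySem.List.enumerate pvPriority) (c :: cs) := by
  rw [pvCand_eq_candIn]
  exact pvG _ (by decide) c cs

theorem pvMinOf_eq_loopR (cats : List String) :
    pvMinOf cats = pvLoopR (PySem.List.enumerate pvPriority) cats := by
  induction cats with
  | nil => decide
  | cons c cs ih => rw [pvMinOf, ih, pvCrux]

theorem pvLoopR_map (ps : List (Int × String)) (cats : List String) :
    (pvLoopR ps cats).map Prod.snd = pvLoopP (ps.map Prod.snd) cats := by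
  induction ps with
  | nil => rfl
  | cons ip ps ih =>
    obtain ⟨i, p⟩ := ip
    simp only [pvLoopR, pvLoopP, List.map_cons]
    by_cases h : cats.contains p = true
    · rw [if_pos h, if_pos h]; rfl
    · rw [if_neg h, if_neg h]; exact ih

-- ===== VERDICT (by name: the statement is the Claim_ definition above) =====
theorem pvMain (cats : List String) :
    (match pvLoopP pvPriority cats with
     | some v => v
     | none => match pvLoopC cats with | some v => v | none => "other")
    = (match (cats.foldl pvStep (none, none)).1 with
       | some bv => bv.2
       | none => match (cats.foldl pvStep (none, none)).2 with | some v => v | none => "other") := by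
  rw [pvFold_decomp, pvMrg_none_left]
  have hmap : (pvMinOf cats).map Prod.snd = pvLoopP pvPriority cats := by
    rw [pvMinOf_eq_loopR, pvLoopR_map, PySem.List.map_snd_enumerate]
  cases hm : pvMinOf cats with
  | some bv => rw [hm] at hmap; rw [← hmap]; rfl
  | none => rw [hm] at hmap; rw [← hmap]; rfl

theorem get_drug_class_spec : Claim_equal_get_drug_class := by
  intro entry _
  exact pvMain ((PySem.Dict.mk entry).getD "categories" [])
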